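-- pv_equiv track=rewrite | github.com/talsh123/socket_communication | server.py | username_obj
-- ===== SOURCE A (Python) =====
-- def username_obj(line):
--     username = ''
--     password = ''
--     reached_empty_space = False
--     for ch in line:
--         if ch == ' ':
--             reached_empty_space = True
--             continue
--         if ch == '\n':
--             break
--         if reached_empty_space:
--             password += ch
--         else:
--             username += ch
--     return [username, password]
-- ===== SOURCE B (Python) =====
-- def username_obj(line):
--     head = line.split('\n', 1)[0]
--     username, _, rest = head.partition(' ')
--     password = rest.replace(' ', '')
--     return [username, password]
-- ===== Notes on version B (the rewrite author's own statement) =====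
-- stated objective: idiomatic
-- what changed: Replaces the manual char-classification loop with stateful flag by standard string operations: truncate at the first newline, partition on the first space, and delete remaining spaces from the tail.
import Mathlib
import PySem

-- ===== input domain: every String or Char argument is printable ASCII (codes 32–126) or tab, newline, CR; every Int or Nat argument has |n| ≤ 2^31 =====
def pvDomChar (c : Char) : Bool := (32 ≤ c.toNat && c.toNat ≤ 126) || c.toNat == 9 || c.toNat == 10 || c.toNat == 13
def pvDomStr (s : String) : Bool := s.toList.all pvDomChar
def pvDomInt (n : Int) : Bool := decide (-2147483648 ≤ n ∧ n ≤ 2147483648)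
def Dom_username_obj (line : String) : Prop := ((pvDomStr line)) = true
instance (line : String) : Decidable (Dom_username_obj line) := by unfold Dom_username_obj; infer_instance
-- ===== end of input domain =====

-- B replaces A's single stateful char loop by idiomatic string passes (truncate at first
-- newline, partition on the first space, delete remaining spaces); same cost, same values.

-- ===== PORT A =====
-- A's loop, step for step: the two accumulated strings are carried as List Char
-- (Python '+=' on str ↔ append), the 'reached_empty_space' flag as a Bool; 'break' on '\n'
-- returns the state immediately.
def usernameLoopA : List Char → List Char → List Char → Bool → List String
  | [], u, p, _ => [String.mk u, String.mk p]
  | c :: cs, u, p, f =>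
    if c = ' ' then usernameLoopA cs u p true
    else if c = '\n' then [String.mk u, String.mk p]
    else if f then usernameLoopA cs u (p ++ [c]) f
    else usernameLoopA cs (u ++ [c]) p f

def username_obj (line : String) : List String :=
  usernameLoopA line.toList [] [] false

-- ===== PORT B =====
-- Hand port of Source B's standard-library calls over List Char, each exact on all inputs:
--   line.split('\n', 1)[0]  = prefix before the first '\n'  = takeWhile (· ≠ '\n')
--   head.partition(' ')     = (takeWhile (· ≠ ' '), _, drop 1 ∘ dropWhile (· ≠ ' '))
--   rest.replace(' ', '')   = filter (· ≠ ' ')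
def username_obj_alt (line : String) : List String :=
  let head := line.toList.takeWhile (· ≠ '\n')
  let username := head.takeWhile (· ≠ ' ')
  let rest := (head.dropWhile (· ≠ ' ')).drop 1
  let password := rest.filter (· ≠ ' ')
  [String.mk username, String.mk password]

-- ===== PRECONDITION & SPEC =====
def Spec_username_obj (line : String) (out : List String) : Prop := out = username_obj_alt line
instance (line : String) (out : List String) : Decidable (Spec_username_obj line out) := by unfold Spec_username_obj; infer_instance

-- ===== CLAIM (what is proved, stated in full; the proofs are below) =====
def Claim_equal_username_obj : Prop := ∀ (line : String), Dom_username_obj line → Spec_username_obj line (username_obj line)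

-- ===== LEMMAS AND PROOFS =====

-- After the flag is set, A collects exactly the non-space chars up to the first newline.
theorem usernameLoopA_true (cs : List Char) : ∀ (u p : List Char),
    usernameLoopA cs u p true
      = [String.mk u, String.mk (p ++ (cs.takeWhile (· ≠ '\n')).filter (· ≠ ' '))] := by
  induction cs with
  | nil => intro u p; simp [usernameLoopA]
  | cons c cs ih =>
    intro u p
    by_cases hsp : c = ' '
    · subst hsp; simp [usernameLoopA, ih]
    · by_cases hnl : c = '\n'
      · subst hnl; simp [usernameLoopA]
      · simp [usernameLoopA, hsp, hnl, ih]

-- Before the flag is set, A's result equals B's four string passes.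
theorem usernameLoopA_false (cs : List Char) : ∀ (u p : List Char),
    usernameLoopA cs u p false
      = [String.mk (u ++ (cs.takeWhile (· ≠ '\n')).takeWhile (· ≠ ' ')),
         String.mk (p ++ (((cs.takeWhile (· ≠ '\n')).dropWhile (· ≠ ' ')).drop 1).filter (· ≠ ' '))] := by
  induction cs with
  | nil => intro u p; simp [usernameLoopA]
  | cons c cs ih =>
    intro u p
    by_cases hsp : c = ' '
    · subst hsp
      simp [usernameLoopA, usernameLoopA_true]
    · by_cases hnl : c = '\n'
      · subst hnl; simp [usernameLoopA]
      · simp [usernameLoopA, hsp, hnl, ih]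

-- ===== VERDICT (by name: the statement is the Claim_ definition above) =====
theorem username_obj_spec : Claim_equal_username_obj := by
  intro line _
  unfold Spec_username_obj username_obj username_obj_alt
  simp [usernameLoopA_false]
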